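-- pv_equiv track=rewrite | github.com/XCore-mindustry/XCore-discord-bot | src/xcore_discord_bot/store_mappers.py | _normalized_str_tuple
-- ===== SOURCE A (Python) =====
-- def _normalized_optional_str(value: object) -> str | None:
--     if value is None:
--         return None
--     normalized = str(value).strip()
--     return normalized or None
--
-- def _normalized_str_tuple(value: object) -> tuple[str, ...]:
--     if not isinstance(value, (list, tuple, set, frozenset)):
--         return ()
--
--     result: list[str] = []
--     seen: set[str] = set()
--     for item in value:
--         normalized = _normalized_optional_str(item)
--         if normalized is None or normalized in seen:
--             continue
--         seen.add(normalized)
--         result.append(normalized)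
--     return tuple(result)
-- ===== SOURCE B (Python) =====
-- def _normalized_optional_str(value: object) -> str | None:
--     if value is None:
--         return None
--     normalized = str(value).strip()
--     return normalized or None
--
-- def _dedup_ahead(items: list) -> list:
--     # recursive keep-first dedup: keep the head, delete every later copy
--     # of it before recursing -- no 'seen' structure is ever maintained
--     if not items:
--         return []
--     head = items[0]
--     return [head] + _dedup_ahead([x for x in items[1:] if x != head])
--
-- def _normalized_str_tuple(value: object) -> tuple[str, ...]:
--     if not isinstance(value, (list, tuple, set, frozenset)):
--         return ()
--     normalized = [n for n in map(_normalized_optional_str, value) if n is not None]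
--     return tuple(_dedup_ahead(normalized))
-- ===== Notes on version B (the rewrite author's own statement) =====
-- stated objective: alternative
-- what changed: Two staged passes instead of one stateful loop: first normalize-and-filter the whole iterable, then deduplicate by structural recursion that keeps the head and deletes all later copies of it before recursing, so no 'seen' set (or dict) is maintained at all.
import Mathlib
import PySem

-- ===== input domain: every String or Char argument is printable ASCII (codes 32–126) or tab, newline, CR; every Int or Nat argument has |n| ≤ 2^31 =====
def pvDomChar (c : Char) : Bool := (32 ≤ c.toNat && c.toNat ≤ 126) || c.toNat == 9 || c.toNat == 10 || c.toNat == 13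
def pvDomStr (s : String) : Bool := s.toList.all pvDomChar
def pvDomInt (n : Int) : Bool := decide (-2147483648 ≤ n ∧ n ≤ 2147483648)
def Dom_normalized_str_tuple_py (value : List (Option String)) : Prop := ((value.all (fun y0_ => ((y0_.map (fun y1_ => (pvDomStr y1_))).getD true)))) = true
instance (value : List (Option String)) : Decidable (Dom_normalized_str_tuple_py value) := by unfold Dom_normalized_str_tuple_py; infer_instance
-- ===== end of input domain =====

-- B: two staged passes (normalize+filter, then recursive remove-ahead dedup with no seen set); alternative, same result.
-- shared module helper _normalized_optional_str (str(value).strip() or None; value is already Optional[str] here)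
def pyNormOpt_py (value : Option String) : Option String :=
  match value with
  | none => none
  | some s =>
    let normalized := PySem.Str.strip s
    if normalized = "" then none else some normalized

-- ===== PORT A =====
def normalized_str_tuple_py (value : List (Option String)) : List String :=
  -- isinstance guard: under the type convention value is always a list, so the guard branch is never taken
  (value.foldl
    (fun (st : List String × PySem.Set String) item =>
      match pyNormOpt_py item with
      | none => st
      | some normalized =>
        if PySem.Set.contains st.2 normalized then st
        else (st.1 ++ [normalized], PySem.Set.add st.2 normalized))
    ([], PySem.Set.empty)).1

-- ===== PORT B =====
-- _dedup_ahead: keep the head, delete every later copy of it, recurse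
def dedupAhead_py : List String → List String
  | [] => []
  | head :: rest => head :: dedupAhead_py (rest.filter (fun x => x ≠ head))
termination_by l => l.length
decreasing_by
  simp only [List.length_unattach, List.length_cons]
  exact Nat.lt_succ_of_le (le_trans (List.length_filter_le _ _) (le_of_eq List.length_attach))

def normalized_str_tuple_py_alt (value : List (Option String)) : List String :=
  dedupAhead_py (value.filterMap pyNormOpt_py)

-- ===== PRECONDITION & SPEC =====
def Spec_normalized_str_tuple_py (value : List (Option String)) (out : List String) : Prop := out = normalized_str_tuple_py_alt value
instance (value : List (Option String)) (out : List String) : Decidable (Spec_normalized_str_tuple_py value out) := by unfold Spec_normalized_str_tuple_py; infer_instance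

-- ===== CLAIM (what is proved, stated in full; the proofs are below) =====
def Claim_equal_normalized_str_tuple_py : Prop := ∀ (value : List (Option String)), Dom_normalized_str_tuple_py value → Spec_normalized_str_tuple_py value (normalized_str_tuple_py value)

-- ===== LEMMAS AND PROOFS =====

-- A's loop, started with result = seen (as lists), keeps them equal and acts as Set.add per kept item
lemma loop_pair (value : List (Option String)) (r : List String) :
    value.foldl
      (fun (st : List String × PySem.Set String) item =>
        match pyNormOpt_py item with
        | none => st
        | some normalized =>
          if PySem.Set.contains st.2 normalized then st
          else (st.1 ++ [normalized], PySem.Set.add st.2 normalized))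
      (r, r)
    = ((value.filterMap pyNormOpt_py).foldl PySem.Set.add r,
       (value.filterMap pyNormOpt_py).foldl PySem.Set.add r) := by
  induction value generalizing r with
  | nil => rfl
  | cons x xs ih =>
    cases h : pyNormOpt_py x with
    | none => simpa [List.foldl_cons, h] using ih r
    | some n =>
      simp only [List.foldl_cons, List.filterMap_cons, h]
      by_cases hm : n ∈ r
      · rw [if_pos ((PySem.Set.contains_iff _ _).mpr hm), PySem.Set.add_of_mem hm]
        exact ih r
      · rw [if_neg (fun hc => hm ((PySem.Set.contains_iff _ _).mp hc)),
            PySem.Set.add_of_not_mem hm]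
        exact ih (r ++ [n])

lemma dedupAhead_nil : dedupAhead_py [] = [] := by
  rw [dedupAhead_py.eq_def]

lemma dedupAhead_cons (h : String) (t : List String) :
    dedupAhead_py (h :: t) = h :: dedupAhead_py (t.filter (fun x => x ≠ h)) := by
  rw [dedupAhead_py.eq_def]

-- folding Set.add over t extends r by exactly the remove-ahead dedup of the elements not already in r
lemma foldl_add_eq_dedupAhead (t : List String) (r : List String) :
    t.foldl PySem.Set.add r = r ++ dedupAhead_py (t.filter (fun x => decide (x ∉ r))) := by
  induction t generalizing r with
  | nil => simp [dedupAhead_nil]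
  | cons x xs ih =>
    by_cases hm : x ∈ r
    · rw [List.foldl_cons, PySem.Set.add_of_mem hm]
      simp only [List.filter_cons, hm, not_true, decide_false]
      simpa using ih r
    · rw [List.foldl_cons, PySem.Set.add_of_not_mem hm]
      have hfe : (xs.filter (fun y => decide (y ∉ r ++ [x])))
          = (xs.filter (fun y => decide (y ∉ r))).filter (fun y => y ≠ x) := by
        rw [List.filter_filter]
        apply List.filter_congr
        intro a _
        simp [List.mem_append, not_or, and_comm]
      rw [ih (r ++ [x]), hfe, List.append_assoc, List.singleton_append]
      have hc : List.filter (fun y => decide (y ∉ r)) (x :: xs)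
          = x :: List.filter (fun y => decide (y ∉ r)) xs := by
        simp [hm]
      rw [hc, dedupAhead_cons]

-- ===== VERDICT (by name: the statement is the Claim_ definition above) =====
theorem normalized_str_tuple_py_spec : Claim_equal_normalized_str_tuple_py := by
  intro value _
  unfold Spec_normalized_str_tuple_py normalized_str_tuple_py normalized_str_tuple_py_alt
  rw [show (([], PySem.Set.empty) : List String × PySem.Set String)
        = (([] : List String), ([] : List String)) from rfl,
      loop_pair value []]
  simp [foldl_add_eq_dedupAhead]
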